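-- pv_equiv track=rewrite | github.com/MateuszMachowina/learning-computer-science-pl | python/78/78.py | skrot1
-- ===== SOURCE A (Python) =====
-- def skrot1(wiad):
--     algorytm = "ALGORYTM"
--     S = []
--     for i in range(len(algorytm)):
--         S.append(ord(algorytm[i]))
--     if len(wiad)%8 != 0:
--         for i in range(8-len(wiad)%8):
--             wiad+="."
--     dl = len(wiad)
--     il_partii = len(wiad)//8
--     wynik = ""
--     for i in range(il_partii):
--         porcja = wiad[i*8:(i+1)*8]
--         for j in range(8):
--             S[j] = (S[j] + ord(porcja[j]))%128
--     for i in range(8):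
--         wynik = wynik + chr(65 + (S[i])%26)
--     return dl, S, wynik
-- ===== SOURCE B (Python) =====
-- def skrot1(wiad):
--     wiad = wiad + "." * ((8 - len(wiad) % 8) % 8)
--     dl = len(wiad)
--
--     def vec(s):
--         # divide-and-conquer: column sums of a block-aligned segment,
--         # combined by point-wise vector addition of the two halves
--         if len(s) <= 8:
--             return [ord(c) for c in s] + [0] * (8 - len(s))
--         half = 8 * ((len(s) + 8) // 16)
--         left, right = vec(s[:half]), vec(s[half:])
--         return [x + y for x, y in zip(left, right)]
--
--     v = vec(wiad)
--     S = [(ord(a) + x) % 128 for a, x in zip("ALGORYTM", v)]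
--     wynik = "".join(chr(65 + s % 26) for s in S)
--     return dl, S, wynik
-- ===== Notes on version B (the rewrite author's own statement) =====
-- stated objective: alternative
-- what changed: B replaces A's iterative block-by-block update of the 8 running cells (mod 128 at every block) with a recursive divide-and-conquer: the padded message is split at a block boundary, the 8 column sums of each half are computed recursively and combined by point-wise vector addition, and the mod 128 and the ALGORYTM seed are applied once at the end.
import Mathlib
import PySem

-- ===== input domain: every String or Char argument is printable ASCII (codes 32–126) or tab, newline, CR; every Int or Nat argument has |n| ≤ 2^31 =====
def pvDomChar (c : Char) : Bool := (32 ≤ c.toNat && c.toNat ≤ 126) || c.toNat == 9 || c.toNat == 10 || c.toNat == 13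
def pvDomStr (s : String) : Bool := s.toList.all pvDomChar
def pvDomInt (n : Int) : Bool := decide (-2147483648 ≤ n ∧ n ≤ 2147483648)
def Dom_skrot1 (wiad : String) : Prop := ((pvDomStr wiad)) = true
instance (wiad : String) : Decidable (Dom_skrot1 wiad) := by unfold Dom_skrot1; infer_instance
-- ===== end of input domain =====

-- B replaces A's block-by-block running update of the 8 hash cells with a recursive
-- divide-and-conquer: column sums of halves are computed recursively and combined by
-- point-wise vector addition, with the mod 128 applied once at the end (alternative, same cost).

-- ===== PORT A =====
def skrot1 (wiad : String) : Int × List Int × String :=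
  let algorytm := "ALGORYTM".toList
  let S0 : List Int := algorytm.foldl (fun S c => S ++ [(c.toNat : Int)]) []
  let w0 := wiad.toList
  let w := if PySem.Int.mod (w0.length : Int) 8 ≠ 0 then
      (PySem.List.pyRange 0 (8 - PySem.Int.mod (w0.length : Int) 8)).foldl (fun w _ => w ++ ['.']) w0
    else w0
  let dl : Int := (w.length : Int)
  let il : Int := PySem.Int.floordiv dl 8
  let S := (PySem.List.pyRange 0 il).foldl (fun S i =>
      let porcja := PySem.List.slice w (some (i*8)) (some ((i+1)*8))
      (PySem.List.pyRange 0 8).foldl (fun S j =>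
        S.set j.toNat (PySem.Int.mod (S.getD j.toNat 0 + (((PySem.List.pyGet? porcja j).getD '.').toNat : Int)) 128)) S) S0
  let wynik := (PySem.List.pyRange 0 8).foldl (fun acc i =>
      acc ++ [Char.ofNat (65 + PySem.Int.mod (S.getD i.toNat 0) 26).toNat]) ([] : List Char)
  (dl, S, String.mk wynik)

-- ===== PORT B =====
-- recursive helper 'vec' from Source B: column sums via divide and conquer
def pvVec (s : List Char) : List Int :=
  if _h : s.length ≤ 8 then
    s.map (fun c => (c.toNat : Int)) ++ List.replicate (8 - s.length) 0
  else
    let half := 8 * ((s.length + 8) / 16)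
    ((pvVec (s.take half)).zip (pvVec (s.drop half))).map (fun p => p.1 + p.2)
termination_by s.length
decreasing_by
  · simp only [List.length_take]; omega
  · simp only [List.length_drop]; omega

def skrot1_alt (wiad : String) : Int × List Int × String :=
  let w := wiad.toList ++ List.replicate ((8 - wiad.toList.length % 8) % 8) '.'
  let dl : Int := (w.length : Int)
  let v := pvVec w
  let S := ("ALGORYTM".toList.zip v).map (fun p => ((p.1.toNat : Int) + p.2) % 128)
  let wynik := String.mk (S.map (fun s => Char.ofNat (65 + s % 26).toNat))
  (dl, S, wynik)

-- ===== PRECONDITION & SPEC =====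
def Spec_skrot1 (wiad : String) (out : Int × List Int × String) : Prop := out = skrot1_alt wiad
instance (wiad : String) (out : Int × List Int × String) : Decidable (Spec_skrot1 wiad out) := by unfold Spec_skrot1; infer_instance

-- ===== CLAIM (what is proved, stated in full; the proofs are below) =====
def Claim_equal_skrot1 : Prop := ∀ (wiad : String), Dom_skrot1 wiad → Spec_skrot1 wiad (skrot1 wiad)

-- ===== LEMMAS AND PROOFS =====

-- B's per-cell value after k blocks of the padded message w
def pvCol (w : List Char) (k j : Nat) : Int :=
  ((("ALGORYTM".toList.getD j 'A').toNat : Int)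
    + ((List.range k).map (fun i => ((w.getD (i*8+j) '.').toNat : Int))).sum) % 128

-- unmodded column sum over all blocks of w
def pvColS (w : List Char) (j : Nat) : Int :=
  ((List.range (w.length / 8)).map (fun i => ((w.getD (i*8+j) '.').toNat : Int))).sum

theorem pv_exists_eight (u : List Char) (h : 8 ≤ u.length) :
    ∃ a b c d e f g h' t, u = a::b::c::d::e::f::g::h'::t := by
  match u with
  | a::b::c::d::e::f::g::h'::t => exact ⟨a,b,c,d,e,f,g,h',t, rfl⟩
  | [] | [_] | [_,_] | [_,_,_] | [_,_,_,_] | [_,_,_,_,_] | [_,_,_,_,_,_] | [_,_,_,_,_,_,_] =>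
      simp at h

theorem pv_slice_block (w : List Char) (k : Nat) (h : 8*(k+1) ≤ w.length) :
    PySem.List.slice w (some ((k:Int)*8)) (some (((k:Int)+1)*8)) = (w.drop (8*k)).take 8 := by
  have h1 : ¬ ((k:Int)*8 < 0) := by omega
  have h2 : ¬ (((k:Int)+1)*8 < 0) := by omega
  simp only [PySem.List.slice, PySem.List.clampIdx, if_neg h1, if_neg h2]
  have e1 : min ((k:Int)*8).toNat w.length = 8*k := by omega
  have e2 : min (((k:Int)+1)*8).toNat w.length = 8*(k+1) := by omega
  rw [e1, e2]
  congr 1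
  omega

theorem pv_getd_drop (w : List Char) (n j : Nat) (d : Char) :
    w.getD (n+j) d = (w.drop n).getD j d := by
  simp [List.getD_eq_getElem?_getD, List.getElem?_drop]

theorem pv_step8 (w : List Char) (k : Nat) (a b c d e f g h' : Char) (t : List Char)
    (hw : w.drop (8*k) = a::b::c::d::e::f::g::h'::t)
    (s0 s1 s2 s3 s4 s5 s6 s7 : Int) :
    (PySem.List.pyRange 0 8).foldl (fun S j =>
        S.set j.toNat (PySem.Int.mod (S.getD j.toNat 0
          + (((PySem.List.pyGet? (PySem.List.slice w (some ((k:Int)*8)) (some (((k:Int)+1)*8))) j).getD '.').toNat : Int)) 128))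
      [s0,s1,s2,s3,s4,s5,s6,s7]
    = [PySem.Int.mod (s0 + (a.toNat:Int)) 128, PySem.Int.mod (s1 + (b.toNat:Int)) 128,
       PySem.Int.mod (s2 + (c.toNat:Int)) 128, PySem.Int.mod (s3 + (d.toNat:Int)) 128,
       PySem.Int.mod (s4 + (e.toNat:Int)) 128, PySem.Int.mod (s5 + (f.toNat:Int)) 128,
       PySem.Int.mod (s6 + (g.toNat:Int)) 128, PySem.Int.mod (s7 + (h'.toNat:Int)) 128] := by
  have hlen : 8*(k+1) ≤ w.length := by
    have := congrArg List.length hw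
    simp [List.length_drop] at this
    omega
  rw [pv_slice_block w k hlen, hw]
  rfl

theorem pv_colstep (w : List Char) (k j : Nat) (x : Char)
    (hx : w.getD (k*8+j) '.' = x) :
    PySem.Int.mod (pvCol w k j + (x.toNat:Int)) 128 = pvCol w (k+1) j := by
  unfold pvCol
  rw [PySem.Int.mod_eq_emod_of_pos (by norm_num), List.range_succ, List.map_append,
      List.sum_append, Int.emod_add_emod, List.map_cons, List.map_nil, List.sum_cons,
      List.sum_nil, add_zero, hx, add_assoc]

theorem pv_main (w : List Char) (k : Nat) (h : 8*k ≤ w.length) :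
    (List.range k).foldl (fun S (i : Nat) =>
        (PySem.List.pyRange 0 8).foldl (fun S j =>
          S.set j.toNat (PySem.Int.mod (S.getD j.toNat 0
            + (((PySem.List.pyGet? (PySem.List.slice w (some ((i:Int)*8)) (some (((i:Int)+1)*8))) j).getD '.').toNat : Int)) 128)) S)
      [65,76,71,79,82,89,84,77]
    = (List.range 8).map (fun j => pvCol w k j) := by
  induction k with
  | zero => rfl
  | succ k ih =>
    rw [List.range_succ, List.foldl_append, List.foldl_cons, List.foldl_nil,
        ih (by omega)]
    have h8 : 8 ≤ (w.drop (8*k)).length := by rw [List.length_drop]; omega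
    obtain ⟨a,b,c,d,e,f,g,h',t,hw⟩ := pv_exists_eight _ h8
    have hmap : (List.range 8).map (fun j => pvCol w k j)
        = [pvCol w k 0, pvCol w k 1, pvCol w k 2, pvCol w k 3,
           pvCol w k 4, pvCol w k 5, pvCol w k 6, pvCol w k 7] := rfl
    rw [hmap, pv_step8 w k a b c d e f g h' t hw]
    have hg : ∀ j : Nat, j < 8 → w.getD (k*8+j) '.' = (w.drop (8*k)).getD j '.' := by
      intro j _
      rw [show k*8+j = 8*k+j by ring, pv_getd_drop]
    have e0 := pv_colstep w k 0 a (by rw [hg 0 (by norm_num), hw]; rfl)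
    have e1 := pv_colstep w k 1 b (by rw [hg 1 (by norm_num), hw]; rfl)
    have e2 := pv_colstep w k 2 c (by rw [hg 2 (by norm_num), hw]; rfl)
    have e3 := pv_colstep w k 3 d (by rw [hg 3 (by norm_num), hw]; rfl)
    have e4 := pv_colstep w k 4 e (by rw [hg 4 (by norm_num), hw]; rfl)
    have e5 := pv_colstep w k 5 f (by rw [hg 5 (by norm_num), hw]; rfl)
    have e6 := pv_colstep w k 6 g (by rw [hg 6 (by norm_num), hw]; rfl)
    have e7 := pv_colstep w k 7 h' (by rw [hg 7 (by norm_num), hw]; rfl)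
    rw [e0, e1, e2, e3, e4, e5, e6, e7]; rfl

theorem pv_wyn (f : Nat → Int) :
    (PySem.List.pyRange 0 8).foldl (fun acc i =>
        acc ++ [Char.ofNat (65 + PySem.Int.mod (((List.range 8).map f).getD i.toNat 0) 26).toNat]) ([] : List Char)
      = ((List.range 8).map f).map (fun s => Char.ofNat (65 + s % 26).toNat) := by
  simp only [PySem.Int.mod_eq_emod_of_pos (show (0:Int) < 26 by norm_num)]
  rfl

-- the padded message coincides in the two ports
theorem pv_pad (w0 : List Char) :
    (if PySem.Int.mod (w0.length : Int) 8 ≠ 0 then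
        (PySem.List.pyRange 0 (8 - PySem.Int.mod (w0.length : Int) 8)).foldl (fun w _ => w ++ ['.']) w0
      else w0)
    = w0 ++ List.replicate ((8 - w0.length % 8) % 8) '.' := by
  have hm : PySem.Int.mod (w0.length : Int) 8 = ((w0.length % 8 : Nat) : Int) := by
    rw [PySem.Int.mod_eq_emod_of_pos (by norm_num)]
    omega
  by_cases h : w0.length % 8 = 0
  · rw [if_neg (by rw [hm, h]; simp)]
    simp [h]
  · rw [if_pos (by rw [hm]; omega)]
    have hc : (8 - PySem.Int.mod (w0.length : Int) 8) = (((8 - w0.length % 8) % 8 : Nat) : Int) := by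
      rw [hm]; omega
    rw [hc, PySem.List.pyRange_zero_natCast, PySem.List.foldl_append_singleton_eq_map,
        List.map_map]
    congr 1
    rw [show ((fun _ => '.') ∘ fun (k : Nat) => (k : Int)) = (fun (_ : Nat) => '.') from rfl,
        List.map_const', List.length_range]

-- column sums add over a block-aligned split
theorem pv_colS_append (a b : List Char) (ha : 8 ∣ a.length) (j : Nat) (hj : j < 8) :
    pvColS (a ++ b) j = pvColS a j + pvColS b j := by
  obtain ⟨q, hq⟩ := ha
  unfold pvColS
  have hlen : (a ++ b).length / 8 = a.length / 8 + b.length / 8 := by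
    rw [List.length_append]; omega
  rw [hlen, List.range_add, List.map_append, List.sum_append, List.map_map]
  congr 1
  · refine congrArg List.sum (List.map_congr_left ?_)
    intro i hi
    have hi' : i < a.length / 8 := List.mem_range.mp hi
    have hlt : i*8+j < a.length := by omega
    simp [List.getD_eq_getElem?_getD, List.getElem?_append_left hlt]
  · refine congrArg List.sum (List.map_congr_left ?_)
    intro i hi
    have hi' : i < b.length / 8 := List.mem_range.mp hi
    have hidx : (a.length / 8 + i) * 8 + j = a.length + (i*8+j) := by omega
    simp only [Function.comp]
    rw [hidx]
    simp [List.getD_eq_getElem?_getD, List.getElem?_append_right (by omega : a.length ≤ a.length + (i*8+j))]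

-- vec computes the unmodded column sums of a block-aligned string
theorem pv_vec_spec : ∀ (w : List Char), 8 ∣ w.length →
    pvVec w = (List.range 8).map (fun j => pvColS w j) := by
  intro w
  induction w using pvVec.induct with
  | case1 s h =>
    intro hd
    rw [pvVec]
    rw [dif_pos h]
    have : s.length = 0 ∨ s.length = 8 := by omega
    rcases this with h0 | h8
    · rw [List.length_eq_zero_iff.mp h0] at *
      simp [pvColS, List.range_succ]
    · obtain ⟨a,b,c,d,e,f,g,h',t,hw⟩ := pv_exists_eight s (by omega)
      subst hw
      have ht : t = [] := by simpa using h8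
      subst ht
      simp [pvColS, List.range_succ]
  | case2 s h half ih1 ih2 =>
    intro hd
    have h9 : 9 ≤ s.length := by omega
    have hhv : half = 8 * ((s.length + 8) / 16) := rfl
    have hhalf : 8 * ((s.length + 8) / 16) ≤ s.length ∧ 8 ≤ 8 * ((s.length + 8) / 16) := by
      constructor <;> omega
    have hta : (s.take (8 * ((s.length + 8) / 16))).length = 8 * ((s.length + 8) / 16) := by
      rw [List.length_take]; omega
    have hda : 8 ∣ (s.drop (8 * ((s.length + 8) / 16))).length := by
      rw [List.length_drop]
      obtain ⟨q, hq⟩ := hd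
      omega
    simp only [hhv] at ih1 ih2
    rw [pvVec, dif_neg h]
    show ((pvVec (s.take (8 * ((s.length + 8) / 16)))).zip
        (pvVec (s.drop (8 * ((s.length + 8) / 16))))).map (fun p => p.1 + p.2)
      = (List.range 8).map (fun j => pvColS s j)
    rw [ih1 (by rw [hta]; exact ⟨_, rfl⟩), ih2 hda]
    have hz : ∀ f g : Nat → Int,
        (((List.range 8).map f).zip ((List.range 8).map g)).map (fun p => p.1 + p.2)
          = (List.range 8).map (fun j => f j + g j) := fun f g => rfl
    rw [hz]
    have hsplit : s.take (8 * ((s.length + 8) / 16)) ++ s.drop (8 * ((s.length + 8) / 16)) = s :=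
      List.take_append_drop _ s
    apply List.map_congr_left
    intro j hj
    have hj8 : j < 8 := List.mem_range.mp hj
    conv_rhs => rw [← hsplit]
    rw [pv_colS_append _ _ (by rw [hta]; exact ⟨_, rfl⟩) j hj8]

-- ===== VERDICT (by name: the statement is the Claim_ definition above) =====
theorem skrot1_spec : Claim_equal_skrot1 := by
  intro wiad _
  unfold Spec_skrot1 skrot1 skrot1_alt
  simp only [pv_pad]
  set W := wiad.toList ++ List.replicate ((8 - wiad.toList.length % 8) % 8) '.' with hW
  have hdvd : 8 ∣ W.length := by
    rw [hW, List.length_append, List.length_replicate]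
    omega
  have hdiv : PySem.Int.floordiv (W.length : Int) 8 = ((W.length / 8 : Nat) : Int) := by
    rw [PySem.Int.floordiv_eq_ediv_of_pos (by norm_num)]
    omega
  have hS0 : List.foldl (fun (S : List Int) c => S ++ [(c.toNat : Int)]) [] "ALGORYTM".toList
      = [65,76,71,79,82,89,84,77] := rfl
  rw [hdiv, PySem.List.pyRange_zero_natCast, List.foldl_map, hS0,
      pv_main W (W.length / 8) (by omega)]
  rw [pv_vec_spec W hdvd]
  have hsb : ("ALGORYTM".toList.zip ((List.range 8).map (fun j => pvColS W j))).map
        (fun p => ((p.1.toNat : Int) + p.2) % 128)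
      = (List.range 8).map (fun j => pvCol W (W.length / 8) j) := rfl
  rw [hsb, pv_wyn (fun j => pvCol W (W.length / 8) j)]
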